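-- pv_equiv track=rewrite | github.com/kushpatel7764/BabyLanguage | Interpreter_Decipher.py | getAllAs
-- ===== SOURCE A (Python) =====
-- def getAllAs(inputString):
--     aString = ""
--     for v in inputString:
--         if v == "a":
--             aString = aString + v
--         else:
--             return aString
--     return aString
-- ===== SOURCE B (Python) =====
-- def getAllAs(inputString):
--     stripped = inputString.lstrip('a')
--     return inputString[:len(inputString) - len(stripped)]
-- ===== Notes on version B (the rewrite author's own statement) =====
-- stated objective: idiomatic
-- what changed: Replaces the explicit character loop with repeated string concatenation by a closed-form expression: lstrip('a') locates the end of the leading run and one slice of the original string returns it.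
import Mathlib
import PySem

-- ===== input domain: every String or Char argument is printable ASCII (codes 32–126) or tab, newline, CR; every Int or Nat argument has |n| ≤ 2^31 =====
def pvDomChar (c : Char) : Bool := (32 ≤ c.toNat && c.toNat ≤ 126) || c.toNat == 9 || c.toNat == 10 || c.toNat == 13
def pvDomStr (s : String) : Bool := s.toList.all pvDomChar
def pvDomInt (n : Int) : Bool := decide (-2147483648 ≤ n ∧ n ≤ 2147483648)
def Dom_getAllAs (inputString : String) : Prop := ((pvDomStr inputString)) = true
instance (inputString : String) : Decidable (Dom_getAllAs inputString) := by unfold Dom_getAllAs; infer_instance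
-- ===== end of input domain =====

-- B replaces A's explicit accumulate-and-concatenate loop by a closed-form
-- lstrip('a') + slice of the original string (idiomatic).


-- ===== PORT A =====
-- the for-loop with its early return: accumulator aString, stop at the first non-'a'
def getAllAsGo (acc : List Char) : List Char → List Char
  | [] => acc
  | v :: rest => if v = 'a' then getAllAsGo (acc ++ [v]) rest else acc

def getAllAs (inputString : String) : String :=
  String.ofList (getAllAsGo [] inputString.toList)

-- ===== PORT B =====
-- inputString.lstrip('a') ported by hand as dropWhile (membership in "a"): exact for lstrip with a chars argument
def getAllAs_alt (inputString : String) : String :=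
  -- stripped := inputString.lstrip('a'); return inputString[:len - len(stripped)]
  String.ofList (PySem.List.slice inputString.toList none
    (some ((inputString.toList.length
            - (inputString.toList.dropWhile (fun c => c ∈ ['a'])).length : Nat) : Int)))

-- ===== PRECONDITION & SPEC =====
def Spec_getAllAs (inputString : String) (out : String) : Prop := out = getAllAs_alt inputString
instance (inputString : String) (out : String) : Decidable (Spec_getAllAs inputString out) := by unfold Spec_getAllAs; infer_instance

-- ===== CLAIM (what is proved, stated in full; the proofs are below) =====
def Claim_equal_getAllAs : Prop := ∀ (inputString : String), Dom_getAllAs inputString → Spec_getAllAs inputString (getAllAs inputString)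

-- ===== LEMMAS AND PROOFS =====
theorem getAllAsGo_eq (l acc : List Char) :
    getAllAsGo acc l = acc ++ l.takeWhile (fun c => c = 'a') := by
  induction l generalizing acc with
  | nil => simp [getAllAsGo]
  | cons v rest ih =>
      by_cases h : v = 'a' <;> simp [getAllAsGo, h, ih]

theorem alt_eq_takeWhile (l : List Char) :
    PySem.List.slice l none (some ((l.length - (l.dropWhile (fun c => c ∈ ['a'])).length : Nat) : Int))
      = l.takeWhile (fun c => c = 'a') := by
  rw [PySem.List.slice_to_natCast]
  have hmem : (fun c : Char => decide (c ∈ (['a'] : List Char))) = fun c : Char => decide (c = 'a') := by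
    funext c; simp
  simp only [hmem]
  have hpre := List.takeWhile_prefix (p := fun c : Char => decide (c = 'a')) (l := l)
  have hlen : l.length - (l.dropWhile (fun c : Char => decide (c = 'a'))).length
      = (l.takeWhile (fun c : Char => decide (c = 'a'))).length := by
    have h2 : (l.takeWhile (fun c : Char => decide (c = 'a'))).length
        + (l.dropWhile (fun c : Char => decide (c = 'a'))).length = l.length := by
      rw [← List.length_append, List.takeWhile_append_dropWhile]
    omega
  rw [hlen]
  exact (List.prefix_iff_eq_take.mp hpre).symm

-- ===== VERDICT (by name: the statement is the Claim_ definition above) =====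
theorem getAllAs_spec : Claim_equal_getAllAs := by
  intro s _
  unfold Spec_getAllAs getAllAs getAllAs_alt
  rw [getAllAsGo_eq, alt_eq_takeWhile]
  simp
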